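-- pv_equiv track=rewrite | github.com/mdsutcliffe/Advent-of-Code | 2023/aoc11.py | calculate_distances_expand
-- ===== SOURCE A (Python) =====
-- def calculate_distances_expand(galaxies, scale, empty_rows, empty_columns):
--   d = []
--   for i in range(len(galaxies) - 1):
--     for j in range(i + 1, len(galaxies)):
--       rows = sorted([galaxies[i][0], galaxies[j][0]])
--       columns = sorted([galaxies[i][1], galaxies[j][1]])
--       d_rows = len(set(list(range(rows[0], rows[1]))).intersection(empty_rows)) * (scale - 1)
--       d_columns = len(set(list(range(columns[0], columns[1]))).intersection(empty_columns)) * (scale - 1)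
--       d.append(rows[1] - rows[0] + columns[1] - columns[0] + d_rows + d_columns)
--   return d
-- ===== SOURCE B (Python) =====
-- def calculate_distances_expand(galaxies, scale, empty_rows, empty_columns):
--     f = scale - 1
--     er = sorted(set(empty_rows))
--     ec = sorted(set(empty_columns))
--
--     def count_below(a, x):
--         lo, hi = 0, len(a)
--         while lo < hi:
--             mid = (lo + hi) // 2
--             if a[mid] < x:
--                 lo = mid + 1
--             else:
--                 hi = mid
--         return lo
--
--     pts = [(g[0], g[1],
--             g[0] + f * count_below(er, g[0]),
--             g[1] + f * count_below(ec, g[1])) for g in galaxies]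
--     out = []
--     for i in range(len(pts)):
--         r1, c1, R1, C1 = pts[i]
--         for j in range(i + 1, len(pts)):
--             r2, c2, R2, C2 = pts[j]
--             dr = R2 - R1 if r1 <= r2 else R1 - R2
--             dc = C2 - C1 if c1 <= c2 else C1 - C2
--             out.append(dr + dc)
--     return out
-- ===== Notes on version B (the rewrite author's own statement) =====
-- stated objective: faster
-- what changed: Instead of materialising the integer range between every pair of coordinates and intersecting it with the empty-row/column sets, B precomputes one expanded coordinate pair per galaxy (coordinate plus (scale-1) times the number of distinct empty rows/columns strictly below it, found by binary search in the sorted distinct empties) and each pairwise distance becomes two subtractions ordered by the original coordinates.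
-- outside the precondition, e.g. on calculate_distances_expand([(5,)], 2, {1}, {1}): A returns [], B raises IndexError
import Mathlib
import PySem

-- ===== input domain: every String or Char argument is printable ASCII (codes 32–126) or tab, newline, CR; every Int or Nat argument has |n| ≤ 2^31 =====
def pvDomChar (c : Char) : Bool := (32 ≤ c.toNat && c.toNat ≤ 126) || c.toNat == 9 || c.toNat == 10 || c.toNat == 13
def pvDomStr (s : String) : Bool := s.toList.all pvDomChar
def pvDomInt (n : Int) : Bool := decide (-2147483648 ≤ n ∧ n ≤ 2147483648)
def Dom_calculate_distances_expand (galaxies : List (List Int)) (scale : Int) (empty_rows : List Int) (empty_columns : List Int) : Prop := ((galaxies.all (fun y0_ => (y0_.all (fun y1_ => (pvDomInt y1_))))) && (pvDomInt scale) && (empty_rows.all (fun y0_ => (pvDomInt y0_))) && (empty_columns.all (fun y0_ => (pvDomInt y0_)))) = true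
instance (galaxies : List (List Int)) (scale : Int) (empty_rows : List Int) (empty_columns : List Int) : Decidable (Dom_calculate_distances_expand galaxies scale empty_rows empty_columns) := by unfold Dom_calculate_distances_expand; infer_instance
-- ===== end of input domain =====

-- ===== PORT A =====
-- B precomputes one expanded coordinate pair per galaxy via binary search in the sorted distinct empties,
-- instead of materialising and intersecting a coordinate range per pair (measured faster); return values proved equal.
def calculate_distances_expand (galaxies : List (List Int)) (scale : Int) (empty_rows : List Int) (empty_columns : List Int) : List Int :=
  (PySem.List.pyRange 0 ((galaxies.length : Int) - 1) 1).foldl (fun d i =>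
    (PySem.List.pyRange (i + 1) (galaxies.length : Int) 1).foldl (fun d j =>
      let rows := PySem.List.sorted [PySem.List.pyGetD (PySem.List.pyGetD galaxies i []) 0 0,
                                     PySem.List.pyGetD (PySem.List.pyGetD galaxies j []) 0 0] (fun x => x)
      let columns := PySem.List.sorted [PySem.List.pyGetD (PySem.List.pyGetD galaxies i []) 1 0,
                                        PySem.List.pyGetD (PySem.List.pyGetD galaxies j []) 1 0] (fun x => x)
      let d_rows := PySem.Set.len (PySem.Set.inter
          (PySem.Set.ofList (PySem.List.pyRange (PySem.List.pyGetD rows 0 0) (PySem.List.pyGetD rows 1 0) 1))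
          empty_rows) * (scale - 1)
      let d_columns := PySem.Set.len (PySem.Set.inter
          (PySem.Set.ofList (PySem.List.pyRange (PySem.List.pyGetD columns 0 0) (PySem.List.pyGetD columns 1 0) 1))
          empty_columns) * (scale - 1)
      d ++ [PySem.List.pyGetD rows 1 0 - PySem.List.pyGetD rows 0 0 +
            (PySem.List.pyGetD columns 1 0 - PySem.List.pyGetD columns 0 0) + d_rows + d_columns]) d) []

-- ===== PORT B =====
-- count_below: B's hand-written binary search (number of elements of a, sorted strictly increasing, below x)
def pvCountBelow (a : List Int) (x : Int) (lo hi : Int) : Int :=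
  if h : lo < hi then
    let mid := PySem.Int.floordiv (lo + hi) 2
    if PySem.List.pyGetD a mid 0 < x then pvCountBelow a x (mid + 1) hi
    else pvCountBelow a x lo mid
  else lo
termination_by (hi - lo).toNat
decreasing_by
  · have h1 := PySem.Int.floordiv_two_mid_bounds (le_of_lt h)
    omega
  · have h1 := PySem.Int.floordiv_two_mid_bounds (le_of_lt h)
    have h2 := (PySem.Int.floordiv_lt_iff_lt_mul (show (0 : Int) < 2 by norm_num)).mpr
      (show lo + hi < hi * 2 by omega)
    omega

def calculate_distances_expand_alt (galaxies : List (List Int)) (scale : Int) (empty_rows : List Int) (empty_columns : List Int) : List Int :=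
  let f := scale - 1
  let er := PySem.List.sorted (PySem.Set.ofList empty_rows) (fun y => y)
  let ec := PySem.List.sorted (PySem.Set.ofList empty_columns) (fun y => y)
  let pts : List (Int × Int × Int × Int) := galaxies.map (fun g =>
    let r := PySem.List.pyGetD g 0 0
    let c := PySem.List.pyGetD g 1 0
    (r, c, r + f * pvCountBelow er r 0 (er.length : Int),
           c + f * pvCountBelow ec c 0 (ec.length : Int)))
  (PySem.List.pyRange 0 (pts.length : Int) 1).foldl (fun out i =>
    let p := PySem.List.pyGetD pts i (0, 0, 0, 0)
    (PySem.List.pyRange (i + 1) (pts.length : Int) 1).foldl (fun out j =>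
      let q := PySem.List.pyGetD pts j (0, 0, 0, 0)
      let dr := if p.1 <= q.1 then q.2.2.1 - p.2.2.1 else p.2.2.1 - q.2.2.1
      let dc := if p.2.1 <= q.2.1 then q.2.2.2 - p.2.2.2 else p.2.2.2 - q.2.2.2
      out ++ [dr + dc]) out) []

-- ===== PRECONDITION & SPEC =====
-- Pre_ excludes inputs where some galaxy row has fewer than two entries: on those A raises IndexError
-- whenever it forms a pair (two or more galaxies), and B's precomputation over all galaxies raises even
-- for zero or one galaxy, where A happens to return [] without touching the rows.
def Pre_calculate_distances_expand (galaxies : List (List Int)) (scale : Int) (empty_rows : List Int) (empty_columns : List Int) : Prop :=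
  ∀ g ∈ galaxies, 2 ≤ g.length
instance (galaxies : List (List Int)) (scale : Int) (empty_rows : List Int) (empty_columns : List Int) : Decidable (Pre_calculate_distances_expand galaxies scale empty_rows empty_columns) := by unfold Pre_calculate_distances_expand; infer_instance
def pvWitness_calculate_distances_expand : List (List Int) × Int × List Int × List Int :=
  ([[0, 4], [3, 0], [3, 5]], 10, [1, 2], [1, 2, 3])
def Spec_calculate_distances_expand (galaxies : List (List Int)) (scale : Int) (empty_rows : List Int) (empty_columns : List Int) (out : List Int) : Prop := out = calculate_distances_expand_alt galaxies scale empty_rows empty_columns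
instance (galaxies : List (List Int)) (scale : Int) (empty_rows : List Int) (empty_columns : List Int) (out : List Int) : Decidable (Spec_calculate_distances_expand galaxies scale empty_rows empty_columns out) := by unfold Spec_calculate_distances_expand; infer_instance

-- ===== CLAIM (what is proved, stated in full; the proofs are below) =====
def Claim_equal_calculate_distances_expand : Prop := ∀ (galaxies : List (List Int)) (scale : Int) (empty_rows : List Int) (empty_columns : List Int), Dom_calculate_distances_expand galaxies scale empty_rows empty_columns → Pre_calculate_distances_expand galaxies scale empty_rows empty_columns → Spec_calculate_distances_expand galaxies scale empty_rows empty_columns (calculate_distances_expand galaxies scale empty_rows empty_columns)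

-- ===== LEMMAS AND PROOFS =====

-- sorted of a two-element list, explicitly
theorem pvSortedPair (a b : Int) :
    PySem.List.sorted [a, b] (fun x => x) = if a ≤ b then [a, b] else [b, a] := by
  split_ifs with h
  · exact PySem.List.sorted_eq_self_of_pairwise _ _ (by simp [h])
  · exact PySem.List.sorted_eq_of_perm_of_pairwise_lt _ _ _ (List.Perm.swap _ _ _)
      (by simp [List.pairwise_cons]; omega)

-- the nested append-only double loop is a flatMap over index pairs
theorem pvNestedLoop (F : Int → Int → Int) (n m lo : Int) (init : List Int) :
    (PySem.List.pyRange lo m 1).foldl (fun out i =>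
        (PySem.List.pyRange (i + 1) n 1).foldl (fun o j => o ++ [F i j]) out) init
      = init ++ (PySem.List.pyRange lo m 1).flatMap
          (fun i => (PySem.List.pyRange (i + 1) n 1).map (F i)) := by
  simp only [PySem.List.foldl_append_singleton_eq_map]
  exact PySem.List.foldl_append_eq_flatMap _ _ _

-- counting elements of [lo, hi) is a difference of two strict counts, elementwise
theorem pvCountSplit (lo hi : Int) (h : lo ≤ hi) : ∀ (l : List Int),
    l.countP (fun e => decide (e < hi))
      = l.countP (fun e => decide (e < lo))
        + l.countP (fun e => decide (lo ≤ e) && decide (e < hi))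
  | [] => by simp
  | x :: l => by
    have ih := pvCountSplit lo hi h l
    simp only [List.countP_cons, ih]
    rcases lt_or_ge x lo with h2 | h2
    · have h1 : x < hi := lt_of_lt_of_le h2 h
      simp [h1, h2, not_le.mpr h2]
      omega
    · rcases lt_or_ge x hi with h1 | h1
      · simp [h1, h2, not_lt.mpr h2]
        omega
      · simp [not_lt.mpr h1, not_lt.mpr (le_trans h h1), h2]

-- A's per-pair intersection size, as a difference of the two prefix counts B uses
theorem pvCountInterval (lo hi : Int) (h : lo ≤ hi) (es : List Int) :
    PySem.Set.len (PySem.Set.inter (PySem.Set.ofList (PySem.List.pyRange lo hi 1)) es)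
      = ((PySem.Set.ofList es).countP (fun e => decide (e < hi)) : Int)
        - ((PySem.Set.ofList es).countP (fun e => decide (e < lo)) : Int) := by
  have hperm : (PySem.Set.inter (PySem.Set.ofList (PySem.List.pyRange lo hi 1)) es).Perm
      ((PySem.Set.ofList es).filter (fun e => decide (lo ≤ e) && decide (e < hi))) := by
    rw [List.perm_ext_iff_of_nodup
      (PySem.Set.nodup_inter _ _ (PySem.Set.nodup_ofList _))
      (List.Nodup.filter _ (PySem.Set.nodup_ofList _))]
    intro x
    rw [PySem.Set.mem_inter, PySem.Set.mem_ofList, PySem.List.mem_pyRange_one,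
      List.mem_filter, PySem.Set.mem_ofList]
    simp only [Bool.and_eq_true, decide_eq_true_eq]
    tauto
  rw [PySem.Set.len, hperm.length_eq, ← List.countP_eq_length_filter,
    pvCountSplit lo hi h (PySem.Set.ofList es)]
  push_cast
  ring

-- indexing into a mapped list (B reads its precomputed points this way)
theorem pvGetDMap {A B : Type} (f : A → B) (xs : List A) (i : Int) (d : B)
    (h0 : 0 ≤ i) (h1 : i < (xs.length : Int)) :
    PySem.List.pyGetD (List.map f xs) i d = f (xs[i.toNat]'(by omega)) := by
  rw [PySem.List.pyGetD_eq_getElem _ _ h0 (by simpa using h1), List.getElem_map]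

-- a countP equals r when the list is "all below x" before index r and "none below" from r on
theorem pvCountPChar (a : List Int) (x : Int) (r : Nat) (hr : r ≤ a.length)
    (h1 : ∀ (k : Nat) (h : k < a.length), k < r → a[k] < x)
    (h2 : ∀ (k : Nat) (h : k < a.length), r ≤ k → ¬ a[k] < x) :
    a.countP (fun e => decide (e < x)) = r := by
  conv_lhs => rw [← List.take_append_drop r a]
  rw [List.countP_append]
  have ht : (a.take r).countP (fun e => decide (e < x)) = (a.take r).length := by
    rw [List.countP_eq_length]
    intro e he
    obtain ⟨i, hi, hie⟩ := List.mem_take_iff_getElem.mp he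
    simpa [← hie] using h1 i (by omega) (by omega)
  have hd : (a.drop r).countP (fun e => decide (e < x)) = 0 := by
    rw [List.countP_eq_zero]
    intro e he
    obtain ⟨i, hi, hie⟩ := List.mem_drop_iff_getElem.mp he
    simpa [← hie] using h2 (r + i) (by omega) (by omega)
  rw [ht, hd, List.length_take]
  omega

-- the binary-search loop maintains its bracketing invariant and lands on countP
theorem pvCountBelow_inv (a : List Int) (x : Int) (hs : a.Pairwise (· < ·)) :
    ∀ (n : Nat) (lo hi : Int), (hi - lo).toNat = n → 0 ≤ lo → lo ≤ hi → hi ≤ (a.length : Int) →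
    (∀ (k : Nat) (h : k < a.length), (k : Int) < lo → a[k] < x) →
    (∀ (k : Nat) (h : k < a.length), hi ≤ (k : Int) → ¬ a[k] < x) →
    pvCountBelow a x lo hi = (a.countP (fun e => decide (e < x)) : Int) := by
  intro n
  induction n using Nat.strong_induction_on with
  | _ n ih =>
    intro lo hi hn h0 hlohi hlen hinv1 hinv2
    rw [pvCountBelow]
    by_cases h : lo < hi
    · simp only [h, dif_pos]
      have hmid := PySem.Int.floordiv_two_mid_bounds (le_of_lt h)
      have hmidlt : PySem.Int.floordiv (lo + hi) 2 < hi :=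
        (PySem.Int.floordiv_lt_iff_lt_mul (show (0 : Int) < 2 by norm_num)).mpr (by omega)
      set mid := PySem.Int.floordiv (lo + hi) 2 with hmiddef
      have hmidlen : mid.toNat < a.length := by omega
      rw [PySem.List.pyGetD_eq_getElem a 0 (by omega) (by omega)]
      have hmono := List.pairwise_iff_getElem.mp hs
      by_cases hc : a[mid.toNat] < x
      · simp only [hc, if_pos]
        refine ih (hi - (mid + 1)).toNat (by omega) (mid + 1) hi rfl (by omega) (by omega) hlen ?_ hinv2
        intro k hk hklt
        rcases lt_or_ge (k : Int) lo with hkl | hkl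
        · exact hinv1 k hk hkl
        · rcases eq_or_lt_of_le (show k ≤ mid.toNat by omega) with heq | hlt
          · simpa [heq] using hc
          · exact lt_trans (hmono k mid.toNat hk hmidlen hlt) hc
      · simp only [hc, if_neg, not_false_iff]
        refine ih (mid - lo).toNat (by omega) lo mid rfl h0 (by omega) (by omega) hinv1 ?_
        intro k hk hkge
        rcases eq_or_lt_of_le (show mid.toNat ≤ k by omega) with heq | hlt
        · simpa [← heq] using hc
        · intro hlt2
          exact hc (lt_trans (hmono mid.toNat k hmidlen hk hlt) hlt2)
    · simp only [h, dif_neg, not_false_iff]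
      have hlo : lo = hi := le_antisymm hlohi (not_lt.mp h)
      subst hlo
      rw [pvCountPChar a x lo.toNat (by omega)
        (fun k hk hklt => hinv1 k hk (by omega))
        (fun k hk hkge => hinv2 k hk (by omega))]
      omega

-- B's binary search over the sorted distinct empties computes the strict-prefix count of the raw set
theorem pvCountBelow_sorted (es : List Int) (x : Int) :
    pvCountBelow (PySem.List.sorted (PySem.Set.ofList es) (fun y => y)) x 0
        ((PySem.List.sorted (PySem.Set.ofList es) (fun y => y)).length : Int)
      = ((PySem.Set.ofList es).countP (fun e => decide (e < x)) : Int) := by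
  rw [pvCountBelow_inv _ x (PySem.List.sorted_ofList_pairwise_lt es) _ 0 _ rfl le_rfl
      (by positivity) le_rfl (by omega) (by omega)]
  rw [(PySem.List.sorted_perm (PySem.Set.ofList es) (fun y => y) false).countP_eq]

-- the per-pair term of A equals the per-pair term of B, for any two coordinate pairs
theorem pvTermEq (scale : Int) (er ec : List Int) (r1 c1 r2 c2 : Int) :
    (PySem.List.pyGetD (PySem.List.sorted [r1, r2] (fun x => x)) 1 0
       - PySem.List.pyGetD (PySem.List.sorted [r1, r2] (fun x => x)) 0 0
       + (PySem.List.pyGetD (PySem.List.sorted [c1, c2] (fun x => x)) 1 0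
          - PySem.List.pyGetD (PySem.List.sorted [c1, c2] (fun x => x)) 0 0)
       + PySem.Set.len (PySem.Set.inter (PySem.Set.ofList (PySem.List.pyRange
           (PySem.List.pyGetD (PySem.List.sorted [r1, r2] (fun x => x)) 0 0)
           (PySem.List.pyGetD (PySem.List.sorted [r1, r2] (fun x => x)) 1 0) 1)) er) * (scale - 1)
       + PySem.Set.len (PySem.Set.inter (PySem.Set.ofList (PySem.List.pyRange
           (PySem.List.pyGetD (PySem.List.sorted [c1, c2] (fun x => x)) 0 0)
           (PySem.List.pyGetD (PySem.List.sorted [c1, c2] (fun x => x)) 1 0) 1)) ec) * (scale - 1))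
    = ((if r1 ≤ r2
          then (r2 + (scale - 1) * ((PySem.Set.ofList er).countP (fun e => decide (e < r2)) : Int))
                 - (r1 + (scale - 1) * ((PySem.Set.ofList er).countP (fun e => decide (e < r1)) : Int))
          else (r1 + (scale - 1) * ((PySem.Set.ofList er).countP (fun e => decide (e < r1)) : Int))
                 - (r2 + (scale - 1) * ((PySem.Set.ofList er).countP (fun e => decide (e < r2)) : Int)))
       + (if c1 ≤ c2
          then (c2 + (scale - 1) * ((PySem.Set.ofList ec).countP (fun e => decide (e < c2)) : Int))
                 - (c1 + (scale - 1) * ((PySem.Set.ofList ec).countP (fun e => decide (e < c1)) : Int))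
          else (c1 + (scale - 1) * ((PySem.Set.ofList ec).countP (fun e => decide (e < c1)) : Int))
                 - (c2 + (scale - 1) * ((PySem.Set.ofList ec).countP (fun e => decide (e < c2)) : Int)))) := by
  rw [pvSortedPair r1 r2, pvSortedPair c1 c2]
  split_ifs with hr hc hc <;>
    simp only [PySem.List.pyGetD_ofNat', List.getD, List.getElem?_cons_zero,
      List.getElem?_cons_succ, Option.getD_some] <;>
    rw [pvCountInterval _ _ (by omega) er, pvCountInterval _ _ (by omega) ec] <;>
    ring

-- ===== VERDICT (by name: the statement is the Claim_ definition above) =====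
theorem calculate_distances_expand_spec : Claim_equal_calculate_distances_expand := by
  intro galaxies scale empty_rows empty_columns _hdom _hpre
  unfold Spec_calculate_distances_expand
  simp only [calculate_distances_expand, calculate_distances_expand_alt, List.length_map]
  simp only [pvCountBelow_sorted]
  rw [pvNestedLoop, pvNestedLoop]
  simp only [List.nil_append]
  rcases eq_or_ne galaxies [] with hnil | hne
  · subst hnil
    simp only [List.length_nil, Nat.cast_zero]
    rw [PySem.List.pyRange_one_eq_nil (by norm_num), PySem.List.pyRange_one_eq_nil (by norm_num)]
    simp
  · have hn1 : (1 : Int) ≤ (galaxies.length : Int) := by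
      have := List.length_pos_iff.mpr hne
      omega
    rw [PySem.List.pyRange_one_append 0 ((galaxies.length : Int) - 1) (galaxies.length : Int)
        (by omega) (by omega), List.flatMap_append]
    have hlast : PySem.List.pyRange ((galaxies.length : Int) - 1) (galaxies.length : Int)
        = [(galaxies.length : Int) - 1] := by
      have h := PySem.List.pyRange_one_singleton ((galaxies.length : Int) - 1)
      rwa [show (galaxies.length : Int) - 1 + 1 = (galaxies.length : Int) by ring] at h
    rw [hlast]
    simp only [List.flatMap_cons, List.flatMap_nil, List.append_nil]
    rw [PySem.List.pyRange_one_eq_nil (show (galaxies.length : Int) ≤ (galaxies.length : Int) - 1 + 1 by omega), List.map_nil, List.append_nil]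
    apply List.flatMap_congr
    intro i hi
    rw [PySem.List.mem_pyRange_one] at hi
    apply List.map_congr_left
    intro j hj
    rw [PySem.List.mem_pyRange_one] at hj
    rw [PySem.List.pyGetD_eq_getElem galaxies ([] : List Int) hi.1 (by omega),
        PySem.List.pyGetD_eq_getElem galaxies ([] : List Int) (by omega) (by omega),
        pvGetDMap _ _ i _ hi.1 (by omega), pvGetDMap _ _ j _ (by omega) (by omega)]
    exact pvTermEq scale empty_rows empty_columns _ _ _ _
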